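-- pv_equiv track=rewrite | github.com/rudra496/codevista | codevista/code_age.py | _build_age_histogram
-- ===== SOURCE A (Python) =====
-- from typing import Dict, List, Optional, Tuple, Any
--
-- def _build_age_histogram(file_ages: List[Dict]) -> Dict[str, int]:
--     """Build age distribution histogram with buckets."""
--     buckets = {
--         '0-7 days (hot)': 0,
--         '8-30 days (warm)': 0,
--         '31-90 days': 0,
--         '91-180 days': 0,
--         '181-365 days (cold)': 0,
--         '1-2 years': 0,
--         '2-3 years': 0,
--         '3+ years (ancient)': 0,
--     }
--
--     for fa in file_ages:
--         age = fa['age_days']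
--         if age <= 7:
--             buckets['0-7 days (hot)'] += 1
--         elif age <= 30:
--             buckets['8-30 days (warm)'] += 1
--         elif age <= 90:
--             buckets['31-90 days'] += 1
--         elif age <= 180:
--             buckets['91-180 days'] += 1
--         elif age <= 365:
--             buckets['181-365 days (cold)'] += 1
--         elif age <= 730:
--             buckets['1-2 years'] += 1
--         elif age <= 1095:
--             buckets['2-3 years'] += 1
--         else:
--             buckets['3+ years (ancient)'] += 1
--
--     return dict(buckets)
-- ===== SOURCE B (Python) =====
-- from typing import Dict, List
-- from bisect import bisect_right
--
-- _LIMITS = [7, 30, 90, 180, 365, 730, 1095]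
-- _LABELS = [
--     '0-7 days (hot)',
--     '8-30 days (warm)',
--     '31-90 days',
--     '91-180 days',
--     '181-365 days (cold)',
--     '1-2 years',
--     '2-3 years',
--     '3+ years (ancient)',
-- ]
--
-- def _build_age_histogram(file_ages: List[Dict]) -> Dict[str, int]:
--     """Sort the ages once; each bucket count is the difference of two
--     cumulative bisect_right positions in the sorted list (no per-record
--     bucketing decision)."""
--     ages = sorted(fa['age_days'] for fa in file_ages)
--     cuts = [bisect_right(ages, limit) for limit in _LIMITS] + [len(ages)]
--     result = {}
--     prev = 0
--     for label, cut in zip(_LABELS, cuts):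
--         result[label] = cut - prev
--         prev = cut
--     return result
-- ===== Notes on version B (the rewrite author's own statement) =====
-- stated objective: alternative
-- what changed: Instead of bucketing each record through the 8-branch if/elif cascade, B extracts the ages, sorts them once, computes the cumulative position of each bucket boundary with bisect_right on the sorted list, and obtains every bucket count as the difference of two adjacent cumulative positions.
import Mathlib
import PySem

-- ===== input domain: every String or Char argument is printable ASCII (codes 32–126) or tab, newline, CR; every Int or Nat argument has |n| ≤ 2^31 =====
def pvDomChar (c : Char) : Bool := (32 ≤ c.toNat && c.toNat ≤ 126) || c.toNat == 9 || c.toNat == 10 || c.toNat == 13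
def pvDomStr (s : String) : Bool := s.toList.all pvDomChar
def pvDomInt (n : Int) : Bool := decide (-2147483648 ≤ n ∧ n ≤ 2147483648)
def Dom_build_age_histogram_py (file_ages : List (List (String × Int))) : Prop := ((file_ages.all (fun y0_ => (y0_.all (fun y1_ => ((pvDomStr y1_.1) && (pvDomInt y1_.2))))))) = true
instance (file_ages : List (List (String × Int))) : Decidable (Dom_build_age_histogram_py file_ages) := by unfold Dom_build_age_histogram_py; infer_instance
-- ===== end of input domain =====

-- B sorts the extracted ages once and derives each bucket count as the difference of
-- adjacent cumulative bisect_right positions, instead of A's per-record if/elif cascade.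


-- ===== PORT A =====
-- fa['age_days'] : first-match association-list lookup; Pre_ guarantees the key is present
-- (Python raises KeyError otherwise), so the .getD 0 default is never reached on Pre_.
def build_age_histogram_py (file_ages : List (List (String × Int))) : List (String × Int) :=
  let buckets : PySem.Dict String Int := PySem.Dict.ofList
    [("0-7 days (hot)", 0), ("8-30 days (warm)", 0), ("31-90 days", 0), ("91-180 days", 0),
     ("181-365 days (cold)", 0), ("1-2 years", 0), ("2-3 years", 0), ("3+ years (ancient)", 0)]
  let buckets := file_ages.foldl (fun b fa =>
    let age := (fa.lookup "age_days").getD 0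
    if age ≤ 7 then PySem.Dict.modify b "0-7 days (hot)" 0 (· + 1)
    else if age ≤ 30 then PySem.Dict.modify b "8-30 days (warm)" 0 (· + 1)
    else if age ≤ 90 then PySem.Dict.modify b "31-90 days" 0 (· + 1)
    else if age ≤ 180 then PySem.Dict.modify b "91-180 days" 0 (· + 1)
    else if age ≤ 365 then PySem.Dict.modify b "181-365 days (cold)" 0 (· + 1)
    else if age ≤ 730 then PySem.Dict.modify b "1-2 years" 0 (· + 1)
    else if age ≤ 1095 then PySem.Dict.modify b "2-3 years" 0 (· + 1)
    else PySem.Dict.modify b "3+ years (ancient)" 0 (· + 1)) buckets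
  buckets.items

-- ===== PORT B =====
def pvLimits : List Int := [7, 30, 90, 180, 365, 730, 1095]

def pvLabels : List String :=
  ["0-7 days (hot)", "8-30 days (warm)", "31-90 days", "91-180 days",
   "181-365 days (cold)", "1-2 years", "2-3 years", "3+ years (ancient)"]

-- sort the ages once; cumulative boundary positions via bisect_right; bucket counts = diffs
def build_age_histogram_py_alt (file_ages : List (List (String × Int))) : List (String × Int) :=
  let ages := PySem.List.sorted (file_ages.map (fun fa => (fa.lookup "age_days").getD 0)) (fun x => x) false
  let cuts := pvLimits.map (fun limit => (PySem.List.bisectRight ages limit : Int)) ++ [(ages.length : Int)]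
  let st := (pvLabels.zip cuts).foldl
    (fun (st : PySem.Dict String Int × Int) lc => (st.1.insert lc.1 (lc.2 - st.2), lc.2))
    (PySem.Dict.empty, 0)
  st.1.items

-- ===== PRECONDITION & SPEC =====
-- Pre_ excludes exactly the inputs where some file dict lacks the key 'age_days':
-- there Python A (and Python B alike) raises KeyError.
def Pre_build_age_histogram_py (file_ages : List (List (String × Int))) : Prop :=
  ∀ fa ∈ file_ages, (fa.lookup "age_days").isSome = true
instance (file_ages : List (List (String × Int))) : Decidable (Pre_build_age_histogram_py file_ages) := by unfold Pre_build_age_histogram_py; infer_instance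

def pvWitness_build_age_histogram_py : (List (List (String × Int))) :=
  [[("age_days", 5)], [("age_days", 400), ("name", 3)]]

def Spec_build_age_histogram_py (file_ages : List (List (String × Int))) (out : List (String × Int)) : Prop := out = build_age_histogram_py_alt file_ages
instance (file_ages : List (List (String × Int))) (out : List (String × Int)) : Decidable (Spec_build_age_histogram_py file_ages out) := by unfold Spec_build_age_histogram_py; infer_instance

-- ===== CLAIM (what is proved, stated in full; the proofs are below) =====
def Claim_equal_build_age_histogram_py : Prop := ∀ (file_ages : List (List (String × Int))), Dom_build_age_histogram_py file_ages → Pre_build_age_histogram_py file_ages → Spec_build_age_histogram_py file_ages (build_age_histogram_py file_ages)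

-- ===== LEMMAS AND PROOFS =====

-- the dict state A's loop maintains: the eight fixed labels with their running counts
def pvDictOf (c0 c1 c2 c3 c4 c5 c6 c7 : Int) : PySem.Dict String Int :=
  PySem.Dict.ofList
    [("0-7 days (hot)", c0), ("8-30 days (warm)", c1), ("31-90 days", c2), ("91-180 days", c3),
     ("181-365 days (cold)", c4), ("1-2 years", c5), ("2-3 years", c6), ("3+ years (ancient)", c7)]

theorem pv_items_dictOf (c0 c1 c2 c3 c4 c5 c6 c7 : Int) :
    (pvDictOf c0 c1 c2 c3 c4 c5 c6 c7).items = pvLabels.zip [c0, c1, c2, c3, c4, c5, c6, c7] := by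
  simp [pvDictOf, pvLabels, PySem.Dict.ofList, PySem.Dict.update, PySem.Dict.empty,
        PySem.Dict.insert, PySem.Dict.contains, List.foldl]

theorem pv_mod0 (c0 c1 c2 c3 c4 c5 c6 c7 : Int) :
    PySem.Dict.modify (pvDictOf c0 c1 c2 c3 c4 c5 c6 c7) "0-7 days (hot)" 0 (· + 1)
      = pvDictOf (c0 + 1) c1 c2 c3 c4 c5 c6 c7 := by
  simp [pvDictOf, PySem.Dict.modify, PySem.Dict.ofList, PySem.Dict.get?,
        PySem.Dict.insert, PySem.Dict.getD, PySem.Dict.update, PySem.Dict.empty,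
        PySem.Dict.contains, List.foldl]
theorem pv_mod1 (c0 c1 c2 c3 c4 c5 c6 c7 : Int) :
    PySem.Dict.modify (pvDictOf c0 c1 c2 c3 c4 c5 c6 c7) "8-30 days (warm)" 0 (· + 1)
      = pvDictOf c0 (c1 + 1) c2 c3 c4 c5 c6 c7 := by
  simp [pvDictOf, PySem.Dict.modify, PySem.Dict.ofList, PySem.Dict.get?,
        PySem.Dict.insert, PySem.Dict.getD, PySem.Dict.update, PySem.Dict.empty,
        PySem.Dict.contains, List.foldl]
theorem pv_mod2 (c0 c1 c2 c3 c4 c5 c6 c7 : Int) :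
    PySem.Dict.modify (pvDictOf c0 c1 c2 c3 c4 c5 c6 c7) "31-90 days" 0 (· + 1)
      = pvDictOf c0 c1 (c2 + 1) c3 c4 c5 c6 c7 := by
  simp [pvDictOf, PySem.Dict.modify, PySem.Dict.ofList, PySem.Dict.get?,
        PySem.Dict.insert, PySem.Dict.getD, PySem.Dict.update, PySem.Dict.empty,
        PySem.Dict.contains, List.foldl]
theorem pv_mod3 (c0 c1 c2 c3 c4 c5 c6 c7 : Int) :
    PySem.Dict.modify (pvDictOf c0 c1 c2 c3 c4 c5 c6 c7) "91-180 days" 0 (· + 1)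
      = pvDictOf c0 c1 c2 (c3 + 1) c4 c5 c6 c7 := by
  simp [pvDictOf, PySem.Dict.modify, PySem.Dict.ofList, PySem.Dict.get?,
        PySem.Dict.insert, PySem.Dict.getD, PySem.Dict.update, PySem.Dict.empty,
        PySem.Dict.contains, List.foldl]
theorem pv_mod4 (c0 c1 c2 c3 c4 c5 c6 c7 : Int) :
    PySem.Dict.modify (pvDictOf c0 c1 c2 c3 c4 c5 c6 c7) "181-365 days (cold)" 0 (· + 1)
      = pvDictOf c0 c1 c2 c3 (c4 + 1) c5 c6 c7 := by
  simp [pvDictOf, PySem.Dict.modify, PySem.Dict.ofList, PySem.Dict.get?,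
        PySem.Dict.insert, PySem.Dict.getD, PySem.Dict.update, PySem.Dict.empty,
        PySem.Dict.contains, List.foldl]
theorem pv_mod5 (c0 c1 c2 c3 c4 c5 c6 c7 : Int) :
    PySem.Dict.modify (pvDictOf c0 c1 c2 c3 c4 c5 c6 c7) "1-2 years" 0 (· + 1)
      = pvDictOf c0 c1 c2 c3 c4 (c5 + 1) c6 c7 := by
  simp [pvDictOf, PySem.Dict.modify, PySem.Dict.ofList, PySem.Dict.get?,
        PySem.Dict.insert, PySem.Dict.getD, PySem.Dict.update, PySem.Dict.empty,
        PySem.Dict.contains, List.foldl]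
theorem pv_mod6 (c0 c1 c2 c3 c4 c5 c6 c7 : Int) :
    PySem.Dict.modify (pvDictOf c0 c1 c2 c3 c4 c5 c6 c7) "2-3 years" 0 (· + 1)
      = pvDictOf c0 c1 c2 c3 c4 c5 (c6 + 1) c7 := by
  simp [pvDictOf, PySem.Dict.modify, PySem.Dict.ofList, PySem.Dict.get?,
        PySem.Dict.insert, PySem.Dict.getD, PySem.Dict.update, PySem.Dict.empty,
        PySem.Dict.contains, List.foldl]
theorem pv_mod7 (c0 c1 c2 c3 c4 c5 c6 c7 : Int) :
    PySem.Dict.modify (pvDictOf c0 c1 c2 c3 c4 c5 c6 c7) "3+ years (ancient)" 0 (· + 1)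
      = pvDictOf c0 c1 c2 c3 c4 c5 c6 (c7 + 1) := by
  simp [pvDictOf, PySem.Dict.modify, PySem.Dict.ofList, PySem.Dict.get?,
        PySem.Dict.insert, PySem.Dict.getD, PySem.Dict.update, PySem.Dict.empty,
        PySem.Dict.contains, List.foldl]

theorem pv_dictOf_eq (a0 a1 a2 a3 a4 a5 a6 a7 b0 b1 b2 b3 b4 b5 b6 b7 : Int) :
    pvDictOf a0 a1 a2 a3 a4 a5 a6 a7 = pvDictOf b0 b1 b2 b3 b4 b5 b6 b7 ↔
    (a0 = b0 ∧ a1 = b1 ∧ a2 = b2 ∧ a3 = b3 ∧ a4 = b4 ∧ a5 = b5 ∧ a6 = b6 ∧ a7 = b7) := by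
  simp [pvDictOf, PySem.Dict.ofList, PySem.Dict.update, PySem.Dict.empty,
        PySem.Dict.insert, PySem.Dict.contains, List.foldl, PySem.Dict.mk.injEq]

-- loop invariant for A: the fold adds to each bucket the count of ages in its band
theorem pv_inv (l : List (List (String × Int))) :
    ∀ (c0 c1 c2 c3 c4 c5 c6 c7 : Int),
    (l.foldl (fun b fa =>
      let age := (fa.lookup "age_days").getD 0
      if age ≤ 7 then PySem.Dict.modify b "0-7 days (hot)" 0 (· + 1)
      else if age ≤ 30 then PySem.Dict.modify b "8-30 days (warm)" 0 (· + 1)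
      else if age ≤ 90 then PySem.Dict.modify b "31-90 days" 0 (· + 1)
      else if age ≤ 180 then PySem.Dict.modify b "91-180 days" 0 (· + 1)
      else if age ≤ 365 then PySem.Dict.modify b "181-365 days (cold)" 0 (· + 1)
      else if age ≤ 730 then PySem.Dict.modify b "1-2 years" 0 (· + 1)
      else if age ≤ 1095 then PySem.Dict.modify b "2-3 years" 0 (· + 1)
      else PySem.Dict.modify b "3+ years (ancient)" 0 (· + 1))
      (pvDictOf c0 c1 c2 c3 c4 c5 c6 c7)) =
    pvDictOf
      (c0 + ((l.map (fun fa => (fa.lookup "age_days").getD 0)).countP (fun a => decide (a ≤ 7)) : Int))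
      (c1 + ((l.map (fun fa => (fa.lookup "age_days").getD 0)).countP (fun a => decide (¬(a ≤ 7) ∧ a ≤ 30)) : Int))
      (c2 + ((l.map (fun fa => (fa.lookup "age_days").getD 0)).countP (fun a => decide (¬(a ≤ 30) ∧ a ≤ 90)) : Int))
      (c3 + ((l.map (fun fa => (fa.lookup "age_days").getD 0)).countP (fun a => decide (¬(a ≤ 90) ∧ a ≤ 180)) : Int))
      (c4 + ((l.map (fun fa => (fa.lookup "age_days").getD 0)).countP (fun a => decide (¬(a ≤ 180) ∧ a ≤ 365)) : Int))
      (c5 + ((l.map (fun fa => (fa.lookup "age_days").getD 0)).countP (fun a => decide (¬(a ≤ 365) ∧ a ≤ 730)) : Int))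
      (c6 + ((l.map (fun fa => (fa.lookup "age_days").getD 0)).countP (fun a => decide (¬(a ≤ 730) ∧ a ≤ 1095)) : Int))
      (c7 + ((l.map (fun fa => (fa.lookup "age_days").getD 0)).countP (fun a => decide (¬(a ≤ 1095))) : Int)) := by
  induction l with
  | nil => intro c0 c1 c2 c3 c4 c5 c6 c7; simp
  | cons fa rest ih =>
    intro c0 c1 c2 c3 c4 c5 c6 c7
    simp only [List.foldl_cons, List.map_cons]
    split_ifs with h1 h2 h3 h4 h5 h6 h7 <;>
      first
      | rw [pv_mod0] | rw [pv_mod1] | rw [pv_mod2] | rw [pv_mod3]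
      | rw [pv_mod4] | rw [pv_mod5] | rw [pv_mod6] | rw [pv_mod7]
    all_goals rw [ih, pv_dictOf_eq]
    all_goals refine ⟨?_, ?_, ?_, ?_, ?_, ?_, ?_, ?_⟩
    all_goals simp only [List.countP_cons]
    all_goals (simp [h1, *] <;> omega)

-- bisect_right on a sorted list counts the elements ≤ x
theorem pv_bisect_count (xs : List Int) (x : Int)
    (hs : xs.Pairwise (fun a b => a ≤ b)) :
    PySem.List.bisectRight xs x = xs.countP (fun a => decide (a ≤ x)) := by
  obtain ⟨hk, hpre, hpost⟩ := PySem.List.bisectRight_spec xs x hs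
  set k := PySem.List.bisectRight xs x with hkdef
  have h1 : (xs.take k).countP (fun a => decide (a ≤ x)) = k := by
    rw [List.countP_eq_length.mpr, List.length_take, Nat.min_eq_left hk]
    intro a ha
    obtain ⟨j, hj, rfl⟩ := List.mem_iff_getElem.mp ha
    have hjk : j < k := lt_of_lt_of_le hj (by simp [List.length_take])
    have hjlen : j < xs.length := lt_of_lt_of_le hjk hk
    have := hpre j hjlen hjk
    simpa [List.getElem_take] using this
  have h2 : (xs.drop k).countP (fun a => decide (a ≤ x)) = 0 := by
    rw [List.countP_eq_zero]
    intro a ha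
    obtain ⟨j, hj, rfl⟩ := List.mem_iff_getElem.mp ha
    have hjlen : k + j < xs.length := by
      have := hj; simp [List.length_drop] at this; omega
    have := hpost (k + j) hjlen (by omega)
    simp only [List.getElem_drop]
    simp
    omega
  have := List.countP_append (l₁ := xs.take k) (l₂ := xs.drop k) (p := fun a => decide (a ≤ x))
  rw [List.take_append_drop] at this
  omega

-- a band count is the difference of two cumulative counts
theorem pv_cnt_split (l : List Int) (lo hi : Int) (h : lo ≤ hi) :
    l.countP (fun a => decide (a ≤ hi)) =
    l.countP (fun a => decide (a ≤ lo)) + l.countP (fun a => decide (¬(a ≤ lo) ∧ a ≤ hi)) := by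
  induction l with
  | nil => simp
  | cons a t ih =>
    simp only [List.countP_cons]
    split_ifs <;> simp only [decide_eq_true_eq] at * <;> omega

theorem pv_cnt_not (l : List Int) :
    (l.countP (fun a => decide (¬(a ≤ 1095))) : Int) =
    (l.length : Int) - (l.countP (fun a => decide (a ≤ 1095)) : Int) := by
  induction l with
  | nil => simp
  | cons a t ih =>
    simp only [List.countP_cons, List.length_cons]
    split_ifs <;> simp only [decide_eq_true_eq] at * <;> push_cast <;> omega

-- B's fold over the eight labels with cut values d0..d7 yields the differences
theorem pv_b_items (d0 d1 d2 d3 d4 d5 d6 d7 : Int) :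
    ((pvLabels.zip [d0, d1, d2, d3, d4, d5, d6, d7]).foldl
      (fun (st : PySem.Dict String Int × Int) lc => (st.1.insert lc.1 (lc.2 - st.2), lc.2))
      (PySem.Dict.empty, 0)).1.items =
    pvLabels.zip [d0 - 0, d1 - d0, d2 - d1, d3 - d2, d4 - d3, d5 - d4, d6 - d5, d7 - d6] := by
  simp [pvLabels, List.zip, List.foldl, PySem.Dict.insert, PySem.Dict.empty, PySem.Dict.contains]

-- ===== VERDICT (by name: the statement is the Claim_ definition above) =====
theorem build_age_histogram_py_spec : Claim_equal_build_age_histogram_py := by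
  intro file_ages _ _
  unfold Spec_build_age_histogram_py build_age_histogram_py build_age_histogram_py_alt
  dsimp only
  rw [show PySem.Dict.ofList
    [("0-7 days (hot)", (0:Int)), ("8-30 days (warm)", 0), ("31-90 days", 0), ("91-180 days", 0),
     ("181-365 days (cold)", 0), ("1-2 years", 0), ("2-3 years", 0), ("3+ years (ancient)", 0)]
    = pvDictOf 0 0 0 0 0 0 0 0 from rfl]
  have hA := pv_inv file_ages 0 0 0 0 0 0 0 0
  set ages0 := file_ages.map (fun fa => (fa.lookup "age_days").getD 0) with hages0
  set ages := PySem.List.sorted ages0 (fun x => x) false with hages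
  have hsorted : ages.Pairwise (fun a b => a ≤ b) := PySem.List.sorted_pairwise ages0 (fun x => x)
  have hperm : ages.Perm ages0 := PySem.List.sorted_perm ages0 (fun x => x) false
  have hcnt : ∀ x : Int, PySem.List.bisectRight ages x = ages0.countP (fun a => decide (a ≤ x)) := by
    intro x
    rw [pv_bisect_count ages x hsorted, hperm.countP_eq]
  have hlen : ages.length = ages0.length := hperm.length_eq
  rw [hA, pv_items_dictOf]
  simp only [pvLimits, List.map_cons, List.map_nil, List.cons_append, List.nil_append]
  rw [pv_b_items]
  congr 1
  simp only [hcnt, hlen]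
  have s1 := pv_cnt_split ages0 7 30 (by norm_num)
  have s2 := pv_cnt_split ages0 30 90 (by norm_num)
  have s3 := pv_cnt_split ages0 90 180 (by norm_num)
  have s4 := pv_cnt_split ages0 180 365 (by norm_num)
  have s5 := pv_cnt_split ages0 365 730 (by norm_num)
  have s6 := pv_cnt_split ages0 730 1095 (by norm_num)
  have s7 := pv_cnt_not ages0
  refine List.ext_getElem (by simp) ?_
  intro i hi _
  simp only [List.length_cons, List.length_nil] at hi
  interval_cases i <;> (simp only [List.getElem_cons_zero, List.getElem_cons_succ]; push_cast at * <;> omega)
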